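-- pv_equiv track=rewrite | github.com/lxndrbukin/ThinkFlow | history.py | trim_history
-- ===== SOURCE A (Python) =====
-- def trim_history(messages, max_count=20):
--     if len(messages) <= max_count:
--         return messages
--
--     system_message = messages[0]
--     conversation = messages[1:]
--
--     turns = find_complete_turns(conversation)
--
--     def count_messages():
--         count = 1
--         for turn in turns:
--             count += len(turn)
--         return count
--
--     while count_messages() > max_count:
--         if turns:
--             turns.pop(0)
--         else:
--             break
--
--     result = [system_message]
--     for turn in turns:
--         result.extend(turn)
--
--     return result
--
-- def find_complete_turns(messages):
--     turns = []
--     current_turn = []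
--
--     for msg in messages:
--         current_turn.append(msg)
--
--         if msg["role"] == "assistant" and "tool_calls" not in msg:
--             turns.append(current_turn)
--             current_turn = []
--
--     if current_turn:
--         turns.append(current_turn)
--
--     return turns
-- ===== SOURCE B (Python) =====
-- def trim_history(messages, max_count=20):
--     if len(messages) <= max_count:
--         return messages
--
--     conversation = messages[1:]
--
--     # one pass: the length of each complete turn (trailing partial turn included)
--     lengths = []
--     cur = 0
--     for msg in conversation:
--         cur += 1
--         if msg["role"] == "assistant" and "tool_calls" not in msg:
--             lengths.append(cur)
--             cur = 0
--     if cur: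
--         lengths.append(cur)
--
--     # subtract turn lengths from the total while it exceeds max_count
--     count = 1 + sum(lengths)
--     drop = 0
--     for n in lengths:
--         if count <= max_count:
--             break
--         count -= n
--         drop += n
--
--     return [messages[0]] + conversation[drop:]
-- ===== Notes on version B (the rewrite author's own statement) =====
-- stated objective: alternative
-- what changed: B replaces A's build-turn-lists + recount-and-pop loop by a single pass computing turn lengths, then subtracts lengths from the precomputed total to find how many leading messages to drop, returning a slice.
import Mathlib
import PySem

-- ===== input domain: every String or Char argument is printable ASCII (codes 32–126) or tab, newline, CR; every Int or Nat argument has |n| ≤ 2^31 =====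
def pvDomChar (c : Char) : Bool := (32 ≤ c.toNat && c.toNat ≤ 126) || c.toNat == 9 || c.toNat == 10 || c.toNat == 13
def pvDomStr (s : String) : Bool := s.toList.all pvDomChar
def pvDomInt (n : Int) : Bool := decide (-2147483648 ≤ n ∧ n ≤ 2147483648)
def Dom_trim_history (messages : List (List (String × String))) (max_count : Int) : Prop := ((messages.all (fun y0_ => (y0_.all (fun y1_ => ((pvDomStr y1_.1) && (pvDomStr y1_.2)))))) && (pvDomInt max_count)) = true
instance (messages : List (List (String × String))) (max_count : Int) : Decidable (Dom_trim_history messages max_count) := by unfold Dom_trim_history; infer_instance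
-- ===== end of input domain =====

-- B drops oldest complete turns with one length pass and a prefix-sum subtraction instead of A's
-- repeated recount-and-pop over rebuilt turn lists (return value only; neither mutates its input).

-- ===== PORT A =====
-- msg["role"] == "assistant" and "tool_calls" not in msg  (first-match dict lookup; the
-- identical test appears in both Pythons, so both ports share this one-line helper)
def pvIsTurnEnd (msg : List (String × String)) : Bool :=
  ((PySem.Dict.mk msg).get? "role" == some "assistant") && !((PySem.Dict.mk msg).contains "tool_calls")

def pvFindCompleteTurns (messages : List (List (String × String))) :
    List (List (List (String × String))) :=
  let st := messages.foldl
    (fun (st : List (List (List (String × String))) × List (List (String × String))) msg =>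
      let cur := st.2 ++ [msg]
      if pvIsTurnEnd msg then (st.1 ++ [cur], []) else (st.1, cur))
    ([], [])
  if st.2 ≠ [] then st.1 ++ [st.2] else st.1

def pvCountMessages (turns : List (List (List (String × String)))) : Int :=
  turns.foldl (fun c t => c + (t.length : Int)) 1

def pvTrimLoop : List (List (List (String × String))) → Int → List (List (List (String × String)))
  | [], _ => []
  | t :: rest, m => if pvCountMessages (t :: rest) > m then pvTrimLoop rest m else t :: rest

def trim_history (messages : List (List (String × String))) (max_count : Int) : List (List (String × String)) :=
  if (messages.length : Int) ≤ max_count then messages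
  else
    let system_message := messages.headD []
    let conversation := PySem.List.slice messages (some 1) none
    let turns := pvTrimLoop (pvFindCompleteTurns conversation) max_count
    turns.foldl (fun r t => r ++ t) [system_message]

-- ===== PORT B =====
def pvTurnLengths (conversation : List (List (String × String))) : List Int :=
  let st := conversation.foldl
    (fun (st : List Int × Int) msg =>
      let cur := st.2 + 1
      if pvIsTurnEnd msg then (st.1 ++ [cur], 0) else (st.1, cur))
    ([], 0)
  if st.2 ≠ 0 then st.1 ++ [st.2] else st.1

def pvDropCount : List Int → Int → Int → Int
  | [], _, _ => 0
  | n :: rest, count, m => if count ≤ m then 0 else n + pvDropCount rest (count - n) m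

def trim_history_alt (messages : List (List (String × String))) (max_count : Int) : List (List (String × String)) :=
  if (messages.length : Int) ≤ max_count then messages
  else
    let conversation := PySem.List.slice messages (some 1) none
    let lengths := pvTurnLengths conversation
    let drop := pvDropCount lengths (1 + lengths.sum) max_count
    [messages.headD []] ++ PySem.List.slice conversation (some drop) none

-- ===== PRECONDITION & SPEC =====
-- Pre_ excludes exactly the inputs where Python A raises: an empty messages list with
-- max_count < 0 (IndexError on messages[0]) and a conversation message without a "role"
-- key (KeyError); B raises there too.
def Pre_trim_history (messages : List (List (String × String))) (max_count : Int) : Prop :=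
  (messages.length : Int) ≤ max_count ∨
    (messages ≠ [] ∧ (messages.tail.all (fun m => ((PySem.Dict.mk m).get? "role").isSome)) = true)

instance (messages : List (List (String × String))) (max_count : Int) : Decidable (Pre_trim_history messages max_count) := by
  unfold Pre_trim_history; infer_instance

def pvWitness_trim_history : (List (List (String × String))) × Int :=
  ([[("role", "user"), ("content", "hi")], [("role", "assistant"), ("content", "yo")]], 1)

def Spec_trim_history (messages : List (List (String × String))) (max_count : Int) (out : List (List (String × String))) : Prop := out = trim_history_alt messages max_count
instance (messages : List (List (String × String))) (max_count : Int) (out : List (List (String × String))) : Decidable (Spec_trim_history messages max_count out) := by unfold Spec_trim_history; infer_instance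

-- ===== CLAIM (what is proved, stated in full; the proofs are below) =====
def Claim_equal_trim_history : Prop := ∀ (messages : List (List (String × String))) (max_count : Int), Dom_trim_history messages max_count → Pre_trim_history messages max_count → Spec_trim_history messages max_count (trim_history messages max_count)

-- ===== LEMMAS AND PROOFS =====

theorem pvCount_eq (l : List (List (List (String × String)))) (c : Int) :
    l.foldl (fun c t => c + (t.length : Int)) c = c + (l.map (fun t => (t.length : Int))).sum := by
  induction l generalizing c with
  | nil => simp
  | cons t rest ih => simp [List.foldl_cons, ih]; ring

theorem pvDropCount_nonneg (turns : List (List (List (String × String)))) (c m : Int) :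
    0 ≤ pvDropCount (turns.map (fun t => (t.length : Int))) c m := by
  induction turns generalizing c with
  | nil => simp [pvDropCount]
  | cons t rest ih =>
    simp only [List.map_cons, pvDropCount]
    split
    · omega
    · have := ih (c - (t.length : Int)); omega

theorem pvFoldRel (msgs : List (List (String × String)))
    (turns : List (List (List (String × String)))) (cur : List (List (String × String))) :
    msgs.foldl (fun (st : List Int × Int) msg =>
        let c := st.2 + 1
        if pvIsTurnEnd msg then (st.1 ++ [c], 0) else (st.1, c))
      (turns.map (fun t => (t.length : Int)), (cur.length : Int))
    = ((msgs.foldl (fun st msg =>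
          let c := st.2 ++ [msg]
          if pvIsTurnEnd msg then (st.1 ++ [c], ([] : List (List (String × String)))) else (st.1, c))
        (turns, cur)).1.map (fun t => (t.length : Int)),
       ((((msgs.foldl (fun st msg =>
          let c := st.2 ++ [msg]
          if pvIsTurnEnd msg then (st.1 ++ [c], []) else (st.1, c))
        (turns, cur)).2).length : Int))) := by
  induction msgs generalizing turns cur with
  | nil => simp
  | cons msg rest ih =>
    simp only [List.foldl_cons]
    by_cases h : pvIsTurnEnd msg = true
    · simp only [if_pos h]
      have : ((cur ++ [msg]).length : Int) = (cur.length : Int) + 1 := by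
        simp
      rw [← this]
      have := ih (turns ++ [cur ++ [msg]]) []
      simpa using this
    · simp only [if_neg h]
      have : ((cur ++ [msg]).length : Int) = (cur.length : Int) + 1 := by
        simp
      rw [← this]
      exact ih turns (cur ++ [msg])

theorem pvFlatRel (msgs : List (List (String × String)))
    (turns : List (List (List (String × String)))) (cur : List (List (String × String))) :
    ((msgs.foldl (fun st msg =>
        let c := st.2 ++ [msg]
        if pvIsTurnEnd msg then (st.1 ++ [c], ([] : List (List (String × String)))) else (st.1, c))
      (turns, cur)).1).flatten ++
    ((msgs.foldl (fun st msg =>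
        let c := st.2 ++ [msg]
        if pvIsTurnEnd msg then (st.1 ++ [c], []) else (st.1, c))
      (turns, cur)).2) = turns.flatten ++ cur ++ msgs := by
  induction msgs generalizing turns cur with
  | nil => simp
  | cons msg rest ih =>
    simp only [List.foldl_cons]
    by_cases h : pvIsTurnEnd msg = true
    · simp only [if_pos h]
      have := ih (turns ++ [cur ++ [msg]]) []
      simp only [List.flatten_append, List.flatten_cons] at this
      simpa [List.append_assoc] using this
    · simp only [if_neg h]
      have := ih turns (cur ++ [msg])
      simpa [List.append_assoc] using this

theorem pvLengths_eq (conv : List (List (String × String))) :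
    pvTurnLengths conv = (pvFindCompleteTurns conv).map (fun t => (t.length : Int)) := by
  unfold pvTurnLengths pvFindCompleteTurns
  have := pvFoldRel conv [] []
  simp only [List.map_nil, List.length_nil, Int.natCast_zero] at this
  rw [this]
  set st := conv.foldl (fun st msg =>
      let c := st.2 ++ [msg]
      if pvIsTurnEnd msg then (st.1 ++ [c], ([] : List (List (String × String)))) else (st.1, c))
    ([], []) with hst
  by_cases h : st.2 = []
  · simp [h]
  · simp [h]

theorem pvFlatten_FCT (conv : List (List (String × String))) :
    (pvFindCompleteTurns conv).flatten = conv := by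
  unfold pvFindCompleteTurns
  have := pvFlatRel conv [] []
  simp only [List.flatten_nil, List.nil_append] at this
  set st := conv.foldl (fun st msg =>
      let c := st.2 ++ [msg]
      if pvIsTurnEnd msg then (st.1 ++ [c], ([] : List (List (String × String)))) else (st.1, c))
    ([], []) with hst
  by_cases h : st.2 = []
  · simp only [h, List.append_nil] at this
    simp [h, this]
  · simp [h, List.flatten_append, this]

theorem pvLoopRel (turns : List (List (List (String × String)))) (m : Int) :
    (pvTrimLoop turns m).flatten =
      turns.flatten.drop
        (pvDropCount (turns.map (fun t => (t.length : Int))) (pvCountMessages turns) m).toNat := by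
  induction turns with
  | nil => simp [pvTrimLoop, pvDropCount]
  | cons t rest ih =>
    have hcnt : pvCountMessages (t :: rest) = pvCountMessages rest + (t.length : Int) := by
      simp only [pvCountMessages, List.foldl_cons]
      rw [pvCount_eq, pvCount_eq]; ring
    simp only [pvTrimLoop, List.map_cons, pvDropCount]
    by_cases h : pvCountMessages (t :: rest) > m
    · have hnot : ¬ pvCountMessages (t :: rest) ≤ m := by omega
      simp only [if_pos h, if_neg hnot]
      rw [ih]
      have hd := pvDropCount_nonneg rest (pvCountMessages (t :: rest) - (t.length : Int)) m
      have harg : pvCountMessages (t :: rest) - (t.length : Int) = pvCountMessages rest := by omega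
      rw [harg] at hd ⊢
      have htn : ((t.length : Int) + pvDropCount (rest.map (fun t => (t.length : Int))) (pvCountMessages rest) m).toNat
          = t.length + (pvDropCount (rest.map (fun t => (t.length : Int))) (pvCountMessages rest) m).toNat := by
        omega
      rw [htn, List.flatten_cons, List.drop_append, Nat.add_sub_cancel_left]
      have hnil : List.drop (t.length + (pvDropCount (rest.map (fun t => (t.length : Int))) (pvCountMessages rest) m).toNat) t = [] :=
        List.drop_eq_nil_of_le (Nat.le_add_right _ _)
      rw [hnil, List.nil_append]
    · have hle : pvCountMessages (t :: rest) ≤ m := by omega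
      simp [if_neg h, if_pos hle]

-- ===== VERDICT (by name: the statement is the Claim_ definition above) =====
theorem trim_history_spec : Claim_equal_trim_history := by
  intro messages max_count _hdom hpre
  unfold Spec_trim_history trim_history trim_history_alt
  by_cases hlen : (messages.length : Int) ≤ max_count
  · simp [hlen]
  · simp only [if_neg hlen]
    have hne : messages ≠ [] := by
      rcases hpre with h | ⟨h, _⟩
      · exact absurd h hlen
      · exact h
    obtain ⟨m0, conv, rfl⟩ : ∃ m0 conv, messages = m0 :: conv := by
      cases messages with
      | nil => exact absurd rfl hne
      | cons a l => exact ⟨a, l, rfl⟩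
    simp only [List.headD_cons, PySem.List.slice_from_one, List.tail_cons]
    rw [pvLengths_eq]
    have hfold : (pvTrimLoop (pvFindCompleteTurns conv) max_count).foldl (fun r t => r ++ t) [m0]
        = m0 :: (pvTrimLoop (pvFindCompleteTurns conv) max_count).flatten := by
      generalize pvTrimLoop (pvFindCompleteTurns conv) max_count = ts
      induction ts using List.reverseRecOn with
      | nil => simp
      | append_singleton l t ih => simp [List.foldl_append, ih]
    rw [hfold, pvLoopRel, pvFlatten_FCT]
    have hsum : 1 + ((pvFindCompleteTurns conv).map (fun t => (t.length : Int))).sum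
        = pvCountMessages (pvFindCompleteTurns conv) := by
      simp only [pvCountMessages]
      rw [pvCount_eq]
    rw [hsum]
    set d := pvDropCount ((pvFindCompleteTurns conv).map (fun t => (t.length : Int)))
      (pvCountMessages (pvFindCompleteTurns conv)) max_count with hd
    have hd0 : 0 ≤ d := pvDropCount_nonneg _ _ _
    have : d = ((d.toNat : Nat) : Int) := by omega
    rw [this, PySem.List.slice_from_natCast]
    simp
    omega
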